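-- pv_equiv track=rewrite | github.com/dkenward/libgf2 | libgf2/util.py | parity_sparse_is_faster
-- ===== SOURCE A (Python) =====
-- def parity_sparse_is_faster(bitsx):
--     '''
--     Select an appropriate parity algorithm for computing
--     the parity of bitsx; values with sparsely distributed 1s
--     should use parity_sparse in most cases.
--
--     This effectively runs both algorithms, which seems silly,
--     except that for determining the parity of (x & mask)
--     with a fixed mask numerous times, calculation of
--     parity_sparse_is_faster(mask) will tell whether
--     parity_sparse(x & mask) is a better choice than parity(x & mask).
--     in most cases.
--     '''
--     if bitsx < 0:
--         raise ValueError("Parity defined only for nonnegative integers")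
--     x_sparse = bitsx
--     k = 1
--     while True:
--         x_sparse &= x_sparse - 1 # clear least significant 1
--         if x_sparse == 0:
--             return True
--         if (bitsx >> k) == 0:
--             return False
--         k <<= 1
-- ===== SOURCE B (Python) =====
-- def parity_sparse_is_faster(bitsx):
--     '''Closed-form version: A's doubling loop returns True exactly when
--     popcount(bitsx) - 1 <= ceil_log2-style bit_length of (bit_length - 1).'''
--     if bitsx < 0:
--         raise ValueError("Parity defined only for nonnegative integers")
--     if bitsx == 0:
--         return True
--     return bitsx.bit_count() - 1 <= (bitsx.bit_length() - 1).bit_length()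
-- ===== Notes on version B (the rewrite author's own statement) =====
-- stated objective: simpler
-- what changed: Replaces A's bit-clearing/doubling while-loop with a direct closed-form comparison of the popcount against the bit length of (bit_length minus one).
import Mathlib
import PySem

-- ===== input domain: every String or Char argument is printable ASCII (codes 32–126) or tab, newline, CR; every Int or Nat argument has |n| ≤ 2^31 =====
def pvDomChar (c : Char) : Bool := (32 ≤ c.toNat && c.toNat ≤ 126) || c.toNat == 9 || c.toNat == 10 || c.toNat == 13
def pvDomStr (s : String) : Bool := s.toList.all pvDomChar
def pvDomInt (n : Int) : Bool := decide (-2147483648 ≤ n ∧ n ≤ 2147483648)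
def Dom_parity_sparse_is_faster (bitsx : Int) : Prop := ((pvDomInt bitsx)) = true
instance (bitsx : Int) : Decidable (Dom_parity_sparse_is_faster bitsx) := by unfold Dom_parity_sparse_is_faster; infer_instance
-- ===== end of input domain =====

-- B replaces A's bit-clearing/doubling loop by the closed-form test
-- popcount(bitsx) - 1 <= bit_length(bit_length(bitsx) - 1); same ValueError on negatives (excluded by Pre_).


-- ===== PORT A =====
-- A's 'while True' loop: clear the least significant 1 of x_sparse ('x &&& (x - 1)'),
-- return True when it hits zero, return False when bitsx >> k is zero, else double k.
def pvLoopA (n : Nat) (x : Nat) (k : Nat) : Bool :=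
  if x &&& (x - 1) = 0 then true          -- x_sparse &= x_sparse - 1; if x_sparse == 0
  else if n >>> k = 0 then false          -- if (bitsx >> k) == 0
  else pvLoopA n (x &&& (x - 1)) (k * 2)  -- k <<= 1
termination_by x
decreasing_by
  have h1 : x &&& (x - 1) ≤ x - 1 := Nat.and_le_right
  rcases Nat.eq_zero_or_pos x with h | h
  · exfalso; subst h; simp_all
  · omega

def parity_sparse_is_faster (bitsx : Int) : Bool :=
  if bitsx < 0 then false      -- Python raises ValueError here; excluded by Pre_
  else pvLoopA bitsx.toNat bitsx.toNat 1

-- ===== PORT B =====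
-- pvPop n = n.bit_count() (number of 1 bits); Nat.size = Python's int.bit_length on Nat.
def pvPop (n : Nat) : Nat :=
  if n = 0 then 0 else n % 2 + pvPop (n / 2)
decreasing_by omega

def parity_sparse_is_faster_alt (bitsx : Int) : Bool :=
  if bitsx < 0 then false      -- Python raises ValueError here; excluded by Pre_
  else if bitsx = 0 then true
  else decide (pvPop bitsx.toNat - 1 ≤ Nat.size (Nat.size bitsx.toNat - 1))

-- ===== PRECONDITION & SPEC =====
-- Pre_ excludes exactly the negative inputs, on which A raises ValueError (B raises the same).
def Pre_parity_sparse_is_faster (bitsx : Int) : Prop := 0 ≤ bitsx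
instance (bitsx : Int) : Decidable (Pre_parity_sparse_is_faster bitsx) := by
  unfold Pre_parity_sparse_is_faster; infer_instance
def pvWitness_parity_sparse_is_faster : Int := (6)

def Spec_parity_sparse_is_faster (bitsx : Int) (out : Bool) : Prop := out = parity_sparse_is_faster_alt bitsx
instance (bitsx : Int) (out : Bool) : Decidable (Spec_parity_sparse_is_faster bitsx out) := by unfold Spec_parity_sparse_is_faster; infer_instance

-- ===== CLAIM (what is proved, stated in full; the proofs are below) =====
def Claim_equal_parity_sparse_is_faster : Prop := ∀ (bitsx : Int), Dom_parity_sparse_is_faster bitsx → Pre_parity_sparse_is_faster bitsx → Spec_parity_sparse_is_faster bitsx (parity_sparse_is_faster bitsx)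

-- ===== LEMMAS AND PROOFS =====

theorem pvPop_zero : pvPop 0 = 0 := by rw [pvPop]; simp

theorem pvPop_double {y : Nat} (hy : y ≠ 0) : pvPop (2 * y) = pvPop y := by
  rw [pvPop]
  have h2 : 2 * y ≠ 0 := by omega
  simp [h2, Nat.mul_mod_right]

theorem pvPop_double_add_one (y : Nat) : pvPop (2 * y + 1) = pvPop y + 1 := by
  rw [pvPop]
  have h2 : (2 * y + 1) / 2 = y := by omega
  have h1 : (2 * y + 1) % 2 = 1 := by omega
  simp [h1, h2]; omega

theorem pvPop_eq_zero : ∀ n : Nat, pvPop n = 0 ↔ n = 0 := by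
  intro n
  induction n using Nat.strong_induction_on with
  | _ n ih =>
    rw [pvPop]
    by_cases h : n = 0
    · simp [h]
    · simp only [h, if_false, iff_false]
      intro he
      have h2 : pvPop (n / 2) = 0 := by omega
      have h3 : n / 2 = 0 := (ih _ (by omega)).mp h2
      omega

-- clearing the least significant 1 bit, via Nat.land_bit on the even/odd decomposition
theorem pvClear_odd (y : Nat) : (2 * y + 1) &&& (2 * y) = 2 * y := by
  have h := Nat.land_bit true y false y
  simpa [Nat.bit, Nat.and_self] using h

theorem pvClear_even {y : Nat} (hy : 0 < y) : (2 * y) &&& (2 * y - 1) = 2 * (y &&& (y - 1)) := by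
  have h := Nat.land_bit false y true (y - 1)
  have he : 2 * (y - 1) + 1 = 2 * y - 1 := by omega
  simpa [Nat.bit, he] using h

theorem pvPop_clear : ∀ x : Nat, 0 < x → pvPop (x &&& (x - 1)) = pvPop x - 1 := by
  intro x
  induction x using Nat.strong_induction_on with
  | _ x ih =>
    intro hx
    rcases Nat.even_or_odd x with hev | hod
    · obtain ⟨y, hy⟩ := hev
      have hx2 : x = 2 * y := by omega
      have hy' : 0 < y := by omega
      have hcl : x &&& (x - 1) = 2 * (y &&& (y - 1)) := by rw [hx2]; exact pvClear_even hy'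
      have hiy : pvPop (y &&& (y - 1)) = pvPop y - 1 := ih y (by omega) hy'
      rw [hcl, hx2]
      rcases Nat.eq_zero_or_pos (y &&& (y - 1)) with h0 | h0
      · rw [h0, Nat.mul_zero, pvPop_zero, pvPop_double (by omega)]
        rw [h0, pvPop_zero] at hiy
        omega
      · rw [pvPop_double (by omega), pvPop_double (by omega), hiy]
    · obtain ⟨y, hy⟩ := hod
      have hcl : x &&& (x - 1) = 2 * y := by
        rw [hy, show 2 * y + 1 - 1 = 2 * y from by omega]; exact pvClear_odd y
      rw [hcl, hy, pvPop_double_add_one]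
      rcases Nat.eq_zero_or_pos y with h0 | h0
      · subst h0; simp [pvPop_zero]
      · rw [pvPop_double (by omega)]; omega

theorem pvPop_pos {x : Nat} (hx : 0 < x) : 1 ≤ pvPop x := by
  have := pvPop_eq_zero x; omega

-- budget counter: number of doublings of k = 2^j before bitsx >> k becomes 0
def pvG (n : Nat) (j : Nat) : Nat :=
  if n >>> 2 ^ j = 0 then 0 else 1 + pvG n (j + 1)
termination_by Nat.size n - j
decreasing_by
  rename_i h
  rw [Nat.shiftRight_eq_div_pow] at h
  have hpos : 0 < 2 ^ 2 ^ j := by positivity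
  have h1 : 2 ^ 2 ^ j ≤ n := (Nat.one_le_div_iff hpos).mp (Nat.pos_of_ne_zero h)
  have h2 : 2 ^ j < Nat.size n := Nat.lt_size.mpr h1
  have h3 : j < 2 ^ j := Nat.lt_two_pow_self
  omega

-- the loop computes: True iff (number of 1 bits of x) - 1 fits in the remaining doubling budget
theorem pvLoopA_spec (x : Nat) : ∀ (n j : Nat), pvLoopA n x (2 ^ j) = decide (pvPop x - 1 ≤ pvG n j) := by
  induction x using Nat.strong_induction_on with
  | _ x ih =>
    intro n j
    rw [pvLoopA]
    rcases Nat.eq_zero_or_pos (x &&& (x - 1)) with h0 | h0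
    · have hp : pvPop x ≤ 1 := by
        rcases Nat.eq_zero_or_pos x with hx | hx
        · subst hx; rw [pvPop_zero]; omega
        · have := pvPop_clear x hx
          rw [h0, pvPop_zero] at this
          omega
      simp only [h0, if_pos]
      simp; omega
    · have hne : x &&& (x - 1) ≠ 0 := by omega
      have hx : 0 < x := by
        by_contra h
        have hz : x = 0 := by omega
        subst hz; simp at h0
      have hpc : pvPop (x &&& (x - 1)) = pvPop x - 1 := pvPop_clear x hx
      have hp2 : 2 ≤ pvPop x := by
        have := pvPop_pos (x := x &&& (x - 1)) h0
        omega
      rw [if_neg hne, pvG]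
      by_cases hs : n >>> 2 ^ j = 0
      · rw [if_pos hs, if_pos hs]
        simp; omega
      · rw [if_neg hs, if_neg hs]
        have hlt : x &&& (x - 1) < x := by
          have : x &&& (x - 1) ≤ x - 1 := Nat.and_le_right
          omega
        have hih := ih (x &&& (x - 1)) hlt n (j + 1)
        rw [show 2 ^ j * 2 = 2 ^ (j + 1) from by ring, hih, hpc]
        simp only [decide_eq_decide]
        omega

theorem pvG_closed {n : Nat} (hn : 0 < n) : ∀ j, pvG n j = Nat.size (Nat.size n - 1) - j := by
  intro j
  induction j using pvG.induct n with
  | case1 j h =>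
    rw [pvG, if_pos h]
    rw [Nat.shiftRight_eq_div_pow] at h
    have hpos : 0 < 2 ^ 2 ^ j := by positivity
    have h1 : n < 2 ^ 2 ^ j := by
      rcases Nat.lt_or_ge n (2 ^ 2 ^ j) with hl | hg
      · exact hl
      · exact absurd h (Nat.pos_iff_ne_zero.mp ((Nat.one_le_div_iff hpos).mpr hg))
    have h2 : Nat.size n ≤ 2 ^ j := Nat.size_le.mpr h1
    have h3 : Nat.size (Nat.size n - 1) ≤ j := Nat.size_le.mpr (by
      have hsp : 0 < Nat.size n := Nat.size_pos.mpr hn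
      omega)
    omega
  | case2 j h ih =>
    rw [pvG, if_neg h, ih]
    rw [Nat.shiftRight_eq_div_pow] at h
    have hpos : 0 < 2 ^ 2 ^ j := by positivity
    have h1 : 2 ^ 2 ^ j ≤ n := (Nat.one_le_div_iff hpos).mp (Nat.pos_of_ne_zero h)
    have h2 : 2 ^ j < Nat.size n := Nat.lt_size.mpr h1
    have h3 : j + 1 ≤ Nat.size (Nat.size n - 1) := by
      have hle : 2 ^ j ≤ Nat.size n - 1 := by omega
      exact Nat.lt_size.mpr hle
    omega

-- ===== VERDICT (by name: the statement is the Claim_ definition above) =====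
theorem parity_sparse_is_faster_spec : Claim_equal_parity_sparse_is_faster := by
  intro bitsx _ hpre
  unfold Pre_parity_sparse_is_faster at hpre
  unfold Spec_parity_sparse_is_faster parity_sparse_is_faster parity_sparse_is_faster_alt
  have hnn : ¬ bitsx < 0 := by omega
  simp only [hnn, if_false]
  by_cases h0 : bitsx = 0
  · subst h0
    simp only [if_pos]
    rw [pvLoopA]
    norm_num
  · have hx : 0 < bitsx.toNat := by
      have : 0 < bitsx := lt_of_le_of_ne hpre (Ne.symm h0)
      omega
    simp only [h0, if_false]
    rw [show (1 : Nat) = 2 ^ 0 from rfl, pvLoopA_spec, pvG_closed hx]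
    simp
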